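-- pv_equiv track=rewrite | github.com/bernard-rodrigues/everybody_codes-the_song_of_ducks_and_dragons_2025 | quest 7/stage2.py | check_graph
-- ===== SOURCE A (Python) =====
-- def check_graph(name: str, index: int, available_letters: list[str], instructions_dict: dict[str, str]) -> str | None:
--     if name[index] not in available_letters:
--         return None
--     else:
--         if index == len(name) - 1:
--             return name
--         else:
--             new_available_letters = list(instructions_dict[name[index]])
--             return check_graph(name, index + 1, new_available_letters, instructions_dict)
-- ===== SOURCE B (Python) =====
-- def check_graph(name: str, index: int, available_letters: list[str], instructions_dict: dict[str, str]) -> str | None: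
--     if name[index] not in available_letters:
--         return None
--     for j in range(index, len(name) - 1):
--         if name[j + 1] not in instructions_dict[name[j]]:
--             return None
--     return name
-- ===== Notes on version B (the rewrite author's own statement) =====
-- stated objective: alternative
-- what changed: Replaces the tail recursion that threads a shrinking 'available letters' list through calls by one up-front membership check followed by a flat for-loop over positions that validates each adjacent letter pair (name[j+1] in instructions_dict[name[j]]) directly, with no recursion and no rebuilt letter lists.
import Mathlib
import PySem

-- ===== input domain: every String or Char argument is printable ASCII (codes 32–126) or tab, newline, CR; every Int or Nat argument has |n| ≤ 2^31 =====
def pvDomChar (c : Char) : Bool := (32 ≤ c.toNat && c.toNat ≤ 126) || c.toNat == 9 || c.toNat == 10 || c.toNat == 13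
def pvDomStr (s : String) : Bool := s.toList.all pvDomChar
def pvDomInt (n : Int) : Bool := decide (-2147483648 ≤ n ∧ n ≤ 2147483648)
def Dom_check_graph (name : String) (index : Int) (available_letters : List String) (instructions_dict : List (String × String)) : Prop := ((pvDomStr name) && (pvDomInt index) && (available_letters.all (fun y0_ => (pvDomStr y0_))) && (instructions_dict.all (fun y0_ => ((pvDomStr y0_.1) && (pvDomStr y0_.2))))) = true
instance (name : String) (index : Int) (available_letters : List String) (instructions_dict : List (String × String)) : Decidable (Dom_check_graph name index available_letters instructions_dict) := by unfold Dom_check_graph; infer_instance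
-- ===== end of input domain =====

-- B replaces A's tail recursion (which threads a rebuilt available-letters list) by one
-- up-front membership check plus a flat loop validating each adjacent letter pair; same cost.

-- Python dict lookup (first match in the association list), shared by both ports.
def pvLookup (d : List (String × String)) (k : String) : Option String :=
  (d.find? (fun p => p.1 == k)).map (·.2)

-- ===== PORT A =====
def check_graph (name : String) (index : Int) (available_letters : List String) (instructions_dict : List (String × String)) : Option String :=
  match h : PySem.Str.pyGet? name index with
  | none => none   -- IndexError (outside Pre_)
  | some c =>
    if String.ofList [c] ∈ available_letters then
      if index = PySem.Str.len name - 1 then some name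
      else
        match pvLookup instructions_dict (String.ofList [c]) with
        | none => none   -- KeyError (outside Pre_)
        | some s =>
          check_graph name (index + 1) (s.toList.map (fun ch => String.ofList [ch])) instructions_dict
    else none
termination_by (PySem.Str.len name - 1 - index).toNat
decreasing_by
  have h' : PySem.List.pyGet? name.toList index = some c := by simpa using h
  have hin : PySem.Raise.InRange name.toList.length index := by
    by_contra hn
    rw [← PySem.List.pyGet?_eq_none_iff (xs := name.toList) (i := index)] at hn
    simp [hn] at h'
  unfold PySem.Raise.InRange at hin
  simp only [PySem.Str.len_eq] at *
  omega

-- ===== PORT B =====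
def pvEdges (name : String) (instructions_dict : List (String × String)) : List Int → Option String
  | [] => some name
  | j :: rest =>
    match PySem.Str.pyGet? name (j + 1) with
    | none => none
    | some cn =>
      match PySem.Str.pyGet? name j with
      | none => none
      | some cj =>
        match pvLookup instructions_dict (String.ofList [cj]) with
        | none => none
        | some s => if cn ∈ s.toList then pvEdges name instructions_dict rest else none

def check_graph_alt (name : String) (index : Int) (available_letters : List String) (instructions_dict : List (String × String)) : Option String :=
  match PySem.Str.pyGet? name index with
  | none => none
  | some c =>
    if String.ofList [c] ∈ available_letters then
      pvEdges name instructions_dict (PySem.List.pyRange index (PySem.Str.len name - 1) 1)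
    else none

-- ===== PRECONDITION & SPEC =====
-- The membership gate at step i+1 of the walk: name[i+1] is among the letters dict[name[i]] allows.
def pvEdgeOk (name : String) (d : List (String × String)) (i : Int) : Bool :=
  match PySem.Str.pyGet? name i, PySem.Str.pyGet? name (i + 1) with
  | some cj, some cn =>
      ((d.find? (fun p => p.1 == String.ofList [cj])).map (·.2)).any (fun s => cn ∈ s.toList)
  | _, _ => false

-- Pre_ excludes exactly the inputs where Python raises: an out-of-range index (IndexError), and
-- walks whose membership gates all pass up to some position index..len-2 whose character is
-- missing from instructions_dict (KeyError there).
def Pre_check_graph (name : String) (index : Int) (available_letters : List String) (instructions_dict : List (String × String)) : Prop :=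
  -(PySem.Str.len name) ≤ index ∧ index < PySem.Str.len name ∧
  ∀ j ∈ PySem.List.pyRange index (PySem.Str.len name - 1) 1,
    (((PySem.Str.pyGet? name index).any (fun c => available_letters.contains (String.ofList [c]))) = true ∧
     ∀ i ∈ PySem.List.pyRange index j 1, pvEdgeOk name instructions_dict i = true) →
    ((PySem.Str.pyGet? name j).any
      (fun c => (instructions_dict.find? (fun p => p.1 == String.ofList [c])).isSome)) = true
instance (name : String) (index : Int) (available_letters : List String) (instructions_dict : List (String × String)) : Decidable (Pre_check_graph name index available_letters instructions_dict) := by unfold Pre_check_graph; infer_instance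

def pvWitness_check_graph : String × Int × List String × (List (String × String)) :=
  ("ab", 0, ["a"], [("a", "b"), ("b", "a")])

def Spec_check_graph (name : String) (index : Int) (available_letters : List String) (instructions_dict : List (String × String)) (out : Option String) : Prop := out = check_graph_alt name index available_letters instructions_dict
instance (name : String) (index : Int) (available_letters : List String) (instructions_dict : List (String × String)) (out : Option String) : Decidable (Spec_check_graph name index available_letters instructions_dict out) := by unfold Spec_check_graph; infer_instance

-- ===== CLAIM (what is proved, stated in full; the proofs are below) =====
def Claim_equal_check_graph : Prop := ∀ (name : String) (index : Int) (available_letters : List String) (instructions_dict : List (String × String)), Dom_check_graph name index available_letters instructions_dict → Pre_check_graph name index available_letters instructions_dict → Spec_check_graph name index available_letters instructions_dict (check_graph name index available_letters instructions_dict)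

-- ===== LEMMAS AND PROOFS =====

lemma pvMk_singleton_inj {a b : Char} (h : String.ofList [a] = String.ofList [b]) : a = b := by
  simpa using String.ofList_inj.mp h

lemma pvMem_map_singleton (l : List Char) (c : Char) :
    (String.ofList [c] ∈ l.map (fun ch => String.ofList [ch])) ↔ c ∈ l := by
  constructor
  · intro h
    rcases List.mem_map.1 h with ⟨a, ha, hEq⟩
    exact (pvMk_singleton_inj hEq.symm) ▸ ha
  · intro h
    exact List.mem_map.2 ⟨c, h, rfl⟩

lemma pvInRange_of_some {name : String} {i : Int} {c : Char}
    (h : PySem.Str.pyGet? name i = some c) :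
    -(PySem.Str.len name) ≤ i ∧ i < PySem.Str.len name := by
  have h' : PySem.List.pyGet? name.toList i = some c := by simpa using h
  have hin : PySem.Raise.InRange name.toList.length i := by
    by_contra hn
    rw [← PySem.List.pyGet?_eq_none_iff (xs := name.toList) (i := i)] at hn
    simp [hn] at h'
  unfold PySem.Raise.InRange at hin
  simp only [PySem.Str.len_eq]
  omega

lemma pvSome_of_inRange {name : String} {i : Int}
    (h1 : -(PySem.Str.len name) ≤ i) (h2 : i < PySem.Str.len name) :
    ∃ c, PySem.Str.pyGet? name i = some c := by
  have hin : PySem.Raise.InRange name.toList.length i := by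
    unfold PySem.Raise.InRange
    simp only [PySem.Str.len_eq] at h1 h2
    omega
  cases hc : PySem.List.pyGet? name.toList i with
  | none =>
    rw [PySem.List.pyGet?_eq_none_iff] at hc
    exact absurd hin hc
  | some c => exact ⟨c, by simpa using hc⟩

lemma pvWalk (name : String) (d : List (String × String)) :
    ∀ (n : Nat) (index : Int) (avail : List String),
      (PySem.Str.len name - 1 - index).toNat = n →
      check_graph name index avail d = check_graph_alt name index avail d := by
  intro n
  induction n using Nat.strong_induction_on with
  | _ n ih =>
    intro index avail hn
    rw [check_graph, check_graph_alt]
    cases h : PySem.Str.pyGet? name index with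
    | none => rfl
    | some c =>
      simp only
      by_cases hmem : String.ofList [c] ∈ avail
      · simp only [if_pos hmem]
        obtain ⟨hlo, hhi⟩ := pvInRange_of_some h
        by_cases hlast : index = PySem.Str.len name - 1
        · rw [if_pos hlast, hlast,
            PySem.List.pyRange_one_eq_nil (le_refl _), pvEdges]
        · rw [if_neg hlast]
          have hlt : index < PySem.Str.len name - 1 := by omega
          rw [PySem.List.pyRange_one_cons hlt, pvEdges]
          obtain ⟨c', hc'⟩ := pvSome_of_inRange (name := name) (i := index + 1)
            (by omega) (by omega)
          rw [hc', h]
          simp only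
          cases hl : pvLookup d (String.ofList [c]) with
          | none => rfl
          | some s =>
            simp only
            have hrec := ih (PySem.Str.len name - 1 - (index + 1)).toNat
              (by omega) (index + 1) (s.toList.map (fun ch => String.ofList [ch])) rfl
            rw [hrec, check_graph_alt, hc']
            simp only
            by_cases hc'mem : c' ∈ s.toList
            · rw [if_pos ((pvMem_map_singleton s.toList c').2 hc'mem), if_pos hc'mem]
            · rw [if_neg (fun hx => hc'mem ((pvMem_map_singleton s.toList c').1 hx)),
                if_neg hc'mem]
      · simp only [if_neg hmem]

-- ===== VERDICT (by name: the statement is the Claim_ definition above) =====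
theorem check_graph_spec : Claim_equal_check_graph := by
  intro name index avail d _ _
  unfold Spec_check_graph
  exact pvWalk name d _ index avail rfl
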